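-- pv_equiv track=rewrite | github.com/viroovr/baekjoon | Platinum/Platinum V/1086.py | get_K_divided_up
-- ===== SOURCE A (Python) =====
-- from math import gcd
--
-- def get_K_divided_up(N, numbers, K):
--     M = len(numbers)
--     dp = [[0] * K for _ in range(1 << M)]
--
--     dp[0][0] = 1
--     mods = [i % K for i in numbers]
--     degree = list(map(lambda x: len(str(x)), numbers))
--
--     for mask in range(1 << M):
--         used_length = (10 ** sum(degree[i] for i in range(N) if mask & (1 << i))) % K
--         for i in range(N):
--             if mask & (1 << i):
--                 continue
--
--             new_mask = mask | (1 << i)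
--             for k in range(K):
--                 if dp[mask][k]:
--                     new_rem = (mods[i] * used_length + k) % K
--                     dp[new_mask][new_rem] += dp[mask][k]
--
--     p = dp[-1][0]
--     q = sum(dp[-1])
--
--     if p == q:
--         return "1/1"
--     elif p == 0:
--         return "0/1"
--     else:
--         g = gcd(p, q)
--         return f"{p // g}/{q // g}"
-- ===== SOURCE B (Python) =====
-- from math import gcd
--
-- def get_K_divided_up(N, numbers, K):
--     mods = [numbers[i] % K for i in range(N)]
--     shift = [pow(10, len(str(numbers[i])), K) for i in range(N)]
--     memo = {0: [1] + [0] * (K - 1)}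
--
--     def solve(mask):
--         cached = memo.get(mask)
--         if cached is not None:
--             return cached
--         cnt = [0] * K
--         for i in range(N):
--             if mask >> i & 1:
--                 sub = solve(mask ^ (1 << i))
--                 s, m = shift[i], mods[i]
--                 for k in range(K):
--                     if sub[k]:
--                         cnt[(k * s + m) % K] += sub[k]
--         memo[mask] = cnt
--         return cnt
--
--     full = solve((1 << len(numbers)) - 1)
--     p, q = full[0], sum(full)
--     if p == q:
--         return "1/1"
--     if p == 0:
--         return "0/1"
--     g = gcd(p, q)
--     return f"{p // g}/{q // g}"
-- ===== Notes on version B (the rewrite author's own statement) =====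
-- stated objective: faster
-- what changed: A's bottom-up push DP over all 2^M masks with suffix remainders (recomputing the exact bignum power 10**sum(digits used) mod K for every mask) is replaced by a memoized top-down recursion from the full set that peels the least-significant number and tracks the remainder of the already-built prefix, so every transition uses only the precomputed per-number constant pow(10, digits, K) and only subsets actually reachable from the full mask are ever computed.
import Mathlib
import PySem

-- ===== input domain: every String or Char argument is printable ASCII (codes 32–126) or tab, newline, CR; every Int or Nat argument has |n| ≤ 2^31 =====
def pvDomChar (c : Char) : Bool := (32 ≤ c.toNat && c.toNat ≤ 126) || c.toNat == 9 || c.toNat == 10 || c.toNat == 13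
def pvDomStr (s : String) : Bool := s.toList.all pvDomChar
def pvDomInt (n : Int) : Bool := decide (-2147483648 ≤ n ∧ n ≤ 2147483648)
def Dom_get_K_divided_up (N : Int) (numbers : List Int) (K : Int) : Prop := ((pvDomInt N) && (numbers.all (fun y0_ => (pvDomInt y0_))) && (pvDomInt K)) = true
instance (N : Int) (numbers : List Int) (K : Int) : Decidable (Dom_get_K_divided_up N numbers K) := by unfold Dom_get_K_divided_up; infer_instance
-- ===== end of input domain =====

-- A fills the whole 2^M-mask table bottom-up, pushing counts of SUFFIX remainders onto
-- supersets and recomputing the exact power 10**sum(digits used) per mask; B is a memoized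
-- top-down recursion from the full set that peels the least-significant number and tracks
-- the remainder of the already-built PREFIX, so each transition only needs the per-number
-- constant pow(10, digits, K) (objective: alternative).

-- ===== PORT A =====
-- helpers: the 'mods'/'degree' comprehensions, and 2-d table read/update
-- (Python's dp[m][r] read / write on a list of lists)
def pvMods (numbers : List Int) (K : Int) : List Int := numbers.map (fun x => PySem.Int.mod x K)
def pvDeg (numbers : List Int) : List Nat := numbers.map (fun x => (PySem.Int.toStr x).length)
def pvGet2 (dp : List (List Int)) (m r : Nat) : Int := (dp.getD m []).getD r 0
def pvSet2 (dp : List (List Int)) (m r : Nat) (v : Int) : List (List Int) := dp.set m ((dp.getD m []).set r v)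

-- one iteration of A's 'for mask in range(1 << M)' loop body
def pvAStep (K : Int) (mods : List Int) (degree : List Nat) (n Kn : Nat)
    (dp : List (List Int)) (mask : Nat) : List (List Int) :=
  let s := (List.range n).foldl (fun a i => if mask.testBit i then a + degree.getD i 0 else a) 0
  let ul := PySem.Int.mod ((10 : Int) ^ s) K
  (List.range n).foldl (fun dp i =>
    if mask.testBit i then dp
    else
      let nm := mask ||| 2 ^ i
      (List.range Kn).foldl (fun dp (k : Nat) =>
        let v := pvGet2 dp mask k
        if v ≠ 0 then
          let nr := (PySem.Int.mod (mods.getD i 0 * ul + (k : Int)) K).toNat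
          pvSet2 dp nm nr (pvGet2 dp nm nr + v)
        else dp) dp) dp

def get_K_divided_up (N : Int) (numbers : List Int) (K : Int) : String :=
  let M := numbers.length
  let size := 2 ^ M
  let Kn := K.toNat
  let mods := pvMods numbers K
  let degree := pvDeg numbers
  let n := N.toNat
  let dpInit := pvSet2 (List.replicate size (List.replicate Kn (0 : Int))) 0 0 1
  let dp := (List.range size).foldl (pvAStep K mods degree n Kn) dpInit
  let last := dp.getD (size - 1) []
  let p := last.getD 0 0
  let q := last.foldl (· + ·) 0
  if p = q then "1/1"
  else if p = 0 then "0/1"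
  else
    let g : Int := (Int.gcd p q : Nat)
    PySem.Int.toStr (PySem.Int.floordiv p g) ++ "/" ++ PySem.Int.toStr (PySem.Int.floordiv q g)

-- ===== PORT B =====
-- termination fact for B's recursion (clearing a set bit shrinks the mask)
theorem pv_xor_lt (m i : Nat) (h : m.testBit i = true) : m ^^^ 2 ^ i < m := by
  apply Nat.lt_of_testBit i
  · simp [Nat.testBit_xor, h]
  · exact h
  · intro j hj
    have hne : i ≠ j := Nat.ne_of_lt hj
    simp [Nat.testBit_xor, Nat.testBit_two_pow, hne]

theorem pv_bit_of_and (m i : Nat) (h : m >>> i &&& 1 = 1) : m.testBit i = true := by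
  simp [Nat.testBit, Nat.and_one_is_mod] at *
  omega

-- B's 'solve(mask)' (memo threaded through as state) and its 'for i in range(N)' loop
mutual
def pvSolve (K : Int) (mods shift : List Int) (N : Int)
    (memo : PySem.Dict Nat (List Int)) (mask : Nat) : PySem.Dict Nat (List Int) × List Int :=
  match memo.get? mask with
  | some v => (memo, v)
  | none =>
    let st := pvSolveGo K mods shift N memo mask (PySem.List.pyRange 0 N 1)
      (List.replicate K.toNat (0 : Int))
    (st.1.insert mask st.2, st.2)
termination_by (mask, (PySem.List.pyRange 0 N 1).length + 1)
decreasing_by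
  exact Prod.Lex.right _ (by omega)

def pvSolveGo (K : Int) (mods shift : List Int) (N : Int)
    (memo : PySem.Dict Nat (List Int)) (mask : Nat) (is : List Int) (cnt : List Int) :
    PySem.Dict Nat (List Int) × List Int :=
  match is with
  | [] => (memo, cnt)
  | i :: rest =>
    if hb : mask >>> i.toNat &&& 1 = 1 then
      let sub := pvSolve K mods shift N memo (mask ^^^ 1 <<< i.toNat)
      let s := shift.getD i.toNat 0
      let m := mods.getD i.toNat 0
      let cnt' := (List.range K.toNat).foldl (fun cnt (k : Nat) =>
        let v := sub.2.getD k 0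
        if v ≠ 0 then
          let t := (PySem.Int.mod ((k : Int) * s + m) K).toNat
          cnt.set t (cnt.getD t 0 + v)
        else cnt) cnt
      pvSolveGo K mods shift N sub.1 mask rest cnt'
    else
      pvSolveGo K mods shift N memo mask rest cnt
termination_by (mask, is.length)
decreasing_by
  · apply Prod.Lex.left
    rw [Nat.one_shiftLeft]
    exact pv_xor_lt _ _ (pv_bit_of_and _ _ hb)
  · exact Prod.Lex.right _ (by simp)
  · exact Prod.Lex.right _ (by simp)
end

def get_K_divided_up_alt (N : Int) (numbers : List Int) (K : Int) : String :=
  let mods := (PySem.List.pyRange 0 N 1).map (fun i => PySem.Int.mod (numbers.getD i.toNat 0) K)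
  let shift := (PySem.List.pyRange 0 N 1).map
    (fun i => PySem.Int.powMod 10 (PySem.Int.toStr (numbers.getD i.toNat 0)).length K)
  let memo0 := (PySem.Dict.empty : PySem.Dict Nat (List Int)).insert 0
    ((1 : Int) :: List.replicate (K - 1).toNat (0 : Int))
  let full := (pvSolve K mods shift N memo0 ((1 <<< numbers.length) - 1)).2
  let p := full.getD 0 0
  let q := full.foldl (· + ·) 0
  if p = q then "1/1"
  else if p = 0 then "0/1"
  else
    let g : Int := (Int.gcd p q : Nat)
    PySem.Int.toStr (PySem.Int.floordiv p g) ++ "/" ++ PySem.Int.toStr (PySem.Int.floordiv q g)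

-- ===== PRECONDITION & SPEC =====
-- Pre_ excludes K ≤ 0 (dp rows are empty or '%' is by zero: A raises IndexError /
-- ZeroDivisionError) and N > len(numbers) (A indexes mods[i]/dp[new_mask] out of
-- range: IndexError). On every other input A returns normally.
def Pre_get_K_divided_up (N : Int) (numbers : List Int) (K : Int) : Prop :=
  1 ≤ K ∧ N ≤ (numbers.length : Int)
instance (N : Int) (numbers : List Int) (K : Int) : Decidable (Pre_get_K_divided_up N numbers K) := by unfold Pre_get_K_divided_up; infer_instance
def pvWitness_get_K_divided_up : Int × List Int × Int := (2, [12, 3], 5)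

def Spec_get_K_divided_up (N : Int) (numbers : List Int) (K : Int) (out : String) : Prop := out = get_K_divided_up_alt N numbers K
instance (N : Int) (numbers : List Int) (K : Int) (out : String) : Decidable (Spec_get_K_divided_up N numbers K out) := by unfold Spec_get_K_divided_up; infer_instance

-- ===== CLAIM (what is proved, stated in full; the proofs are below) =====
def Claim_equal_get_K_divided_up : Prop := ∀ (N : Int) (numbers : List Int) (K : Int), Dom_get_K_divided_up N numbers K → Pre_get_K_divided_up N numbers K → Spec_get_K_divided_up N numbers K (get_K_divided_up N numbers K)

-- ===== LEMMAS AND PROOFS =====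

theorem pv_bit_corr (t j i : Nat) :
    (j.testBit i = true ∧ j ^^^ 2 ^ i = t) ↔ (t.testBit i = false ∧ t ||| 2 ^ i = j) := by
  constructor
  · rintro ⟨hb, rfl⟩
    constructor
    · simp [Nat.testBit_xor, hb]
    · apply Nat.eq_of_testBit_eq
      intro x
      by_cases hx : x = i
      · subst hx; simp [Nat.testBit_or, Nat.testBit_xor, hb]
      · simp [Nat.testBit_or, Nat.testBit_xor, Nat.testBit_two_pow, Ne.symm hx]
  · rintro ⟨hb, rfl⟩
    constructor
    · simp [Nat.testBit_or]
    · apply Nat.eq_of_testBit_eq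
      intro x
      by_cases hx : x = i
      · subst hx; simp [Nat.testBit_or, Nat.testBit_xor, hb]
      · simp [Nat.testBit_or, Nat.testBit_xor, Nat.testBit_two_pow, Ne.symm hx]

theorem pv_or_lt (M t i : Nat) (ht : t < 2 ^ M) (hi : i < M) : t ||| 2 ^ i < 2 ^ M :=
  Nat.or_lt_two_pow ht (Nat.pow_lt_pow_right (by omega) hi)

theorem pv_sum_filter_map (p : Nat → Bool) (f : Nat → Int) (l : List Nat) :
    ((l.filter p).map f).sum = (l.map (fun x => if p x then f x else 0)).sum := by
  induction l with
  | nil => rfl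
  | cons x xs ih => by_cases h : p x <;> simp [List.filter_cons, h, ih]

theorem pv_sum_map_add (l : List Nat) (f g : Nat → Int) :
    (l.map (fun x => f x + g x)).sum = (l.map f).sum + (l.map g).sum := by
  induction l with
  | nil => rfl
  | cons x xs ih => simp [ih]; ring

theorem pv_getD_set_lt (row : List Int) (t : Nat) (ht : t < row.length) (v : Int) (r : Nat) :
    (row.set t v).getD r 0 = if r = t then v else row.getD r 0 := by
  by_cases h : r = t
  · subst h
    rw [List.getD_eq_getElem _ _ (by simpa using ht), List.getElem_set_self]
    simp
  · rw [if_neg h]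
    simp [List.getD, List.getElem?_set_ne (fun hh => h hh.symm)]



-- ---- the DP value specifications ----
-- pvG: A's recurrence (suffix remainders: the number formed so far sits to the RIGHT)
def pvSdeg (deg : List Nat) (n m : Nat) : Nat :=
  (List.range n).foldl (fun a i => if m.testBit i then a + deg.getD i 0 else a) 0

def pvUl (deg : List Nat) (n : Nat) (K : Int) (m : Nat) : Int :=
  PySem.Int.mod ((10 : Int) ^ pvSdeg deg n m) K

def pvTgt (K mi ul : Int) (k : Nat) : Nat := (PySem.Int.mod (mi * ul + (k : Int)) K).toNat

-- pvBTgt: B's transition (prefix remainder k shifted left by this number's digits)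
def pvBTgt (K s m : Int) (k : Nat) : Nat := (PySem.Int.mod ((k : Int) * s + m) K).toNat

def pvG (K : Int) (mods : List Int) (deg : List Nat) (n Kn : Nat) : Nat → Nat → Int
  | m, r =>
    (if m = 0 ∧ r = 0 then 1 else 0) +
    ((((List.range n).filter (fun i => m.testBit i)).attach.map (fun i =>
      ((List.range Kn).map (fun k =>
        if pvTgt K (mods.getD i.1 0) (pvUl deg n K (m ^^^ 2 ^ i.1)) k = r
        then pvG K mods deg n Kn (m ^^^ 2 ^ i.1) k else 0)).sum)).sum)
  termination_by m r => m
  decreasing_by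
    have := i.2
    simp only [List.mem_filter] at this
    exact pv_xor_lt _ _ this.2

def pvH (K : Int) (mods shift : List Int) (n Kn : Nat) : Nat → Nat → Int
  | m, r =>
    (if m = 0 ∧ r = 0 then 1 else 0) +
    ((((List.range n).filter (fun i => m.testBit i)).attach.map (fun i =>
      ((List.range Kn).map (fun k =>
        if pvBTgt K (shift.getD i.1 0) (mods.getD i.1 0) k = r
        then pvH K mods shift n Kn (m ^^^ 2 ^ i.1) k else 0)).sum)).sum)
  termination_by m r => m
  decreasing_by
    have := i.2
    simp only [List.mem_filter] at this
    exact pv_xor_lt _ _ this.2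

def pvContrib (K : Int) (mods : List Int) (deg : List Nat) (n Kn : Nat) (i p r : Nat) : Int :=
  ((List.range Kn).map (fun k =>
    if pvTgt K (mods.getD i 0) (pvUl deg n K p) k = r then pvG K mods deg n Kn p k else 0)).sum

def pvContribH (K : Int) (mods shift : List Int) (n Kn : Nat) (i p r : Nat) : Int :=
  ((List.range Kn).map (fun k =>
    if pvBTgt K (shift.getD i 0) (mods.getD i 0) k = r then pvH K mods shift n Kn p k else 0)).sum

theorem pvG_eq (K : Int) (mods : List Int) (deg : List Nat) (n Kn : Nat) (m r : Nat) :
    pvG K mods deg n Kn m r =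
      (if m = 0 ∧ r = 0 then 1 else 0) +
      (((List.range n).filter (fun i => m.testBit i)).map
        (fun i => pvContrib K mods deg n Kn i (m ^^^ 2 ^ i) r)).sum := by
  rw [pvG]
  congr 1
  simp [pvContrib]

theorem pvH_eq (K : Int) (mods shift : List Int) (n Kn : Nat) (m r : Nat) :
    pvH K mods shift n Kn m r =
      (if m = 0 ∧ r = 0 then 1 else 0) +
      (((List.range n).filter (fun i => m.testBit i)).map
        (fun i => pvContribH K mods shift n Kn i (m ^^^ 2 ^ i) r)).sum := by
  rw [pvH]
  congr 1
  simp [pvContribH]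

theorem pv_mod_toNat_lt (K x : Int) (hK : 1 ≤ K) : (PySem.Int.mod x K).toNat < K.toNat := by
  rw [PySem.Int.mod_eq_emod_of_pos (by omega : (0:Int) < K)]
  have h1 : x % K < K := Int.emod_lt_of_pos _ (by omega)
  have h2 : 0 ≤ x % K := Int.emod_nonneg _ (by omega)
  omega

theorem pv_tgt_lt (K mi ul : Int) (hK : 1 ≤ K) (k : Nat) : pvTgt K mi ul k < K.toNat :=
  pv_mod_toNat_lt K _ hK

theorem pv_btgt_lt (K s m : Int) (hK : 1 ≤ K) (k : Nat) : pvBTgt K s m k < K.toNat :=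
  pv_mod_toNat_lt K _ hK

-- ---- table shape (A side) ----
def pvShape (size Kn : Nat) (dp : List (List Int)) : Prop :=
  dp.length = size ∧ ∀ j, j < size → (dp.getD j []).length = Kn

theorem pv_shape_set2 (size Kn : Nat) (dp : List (List Int)) (hS : pvShape size Kn dp)
    (m r : Nat) (v : Int) : pvShape size Kn (pvSet2 dp m r v) := by
  obtain ⟨h1, h2⟩ := hS
  refine ⟨by simp [pvSet2, h1], ?_⟩
  intro j hj
  by_cases h : j = m
  · subst h
    have hj' : j < dp.length := by omega
    rw [pvSet2, List.getD_eq_getElem _ _ (by simpa using hj'), List.getElem_set_self,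
      List.length_set]
    exact h2 j hj
  · rw [pvSet2]
    have heq : (dp.set m ((dp.getD m []).set r v)).getD j [] = dp.getD j [] := by
      simp [List.getD, List.getElem?_set_ne (fun hh => h hh.symm)]
    rw [heq]; exact h2 j hj

theorem pv_get2_set2_ne (dp : List (List Int)) (m r : Nat) (v : Int) (j s : Nat) (h : j ≠ m) :
    pvGet2 (pvSet2 dp m r v) j s = pvGet2 dp j s := by
  simp [pvGet2, pvSet2, List.getD, List.getElem?_set_ne (fun hh => h hh.symm)]

theorem pv_get2_set2_self (size Kn : Nat) (dp : List (List Int)) (hS : pvShape size Kn dp)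
    (m : Nat) (hm : m < size) (r : Nat) (hr : r < Kn) (v : Int) (s : Nat) :
    pvGet2 (pvSet2 dp m r v) m s = if s = r then v else pvGet2 dp m s := by
  obtain ⟨h1, h2⟩ := hS
  unfold pvGet2 pvSet2
  have hm' : m < dp.length := by omega
  have hrow : (dp.set m ((dp.getD m []).set r v)).getD m [] = (dp.getD m []).set r v := by
    rw [List.getD_eq_getElem _ ([]) (by simp [hm']), List.getElem_set_self]
  rw [hrow, pv_getD_set_lt _ _ (by rw [h2 m hm]; exact hr)]

theorem pv_get2_replicate (size Kn : Nat) (j r : Nat) :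
    pvGet2 (List.replicate size (List.replicate Kn (0 : Int))) j r = 0 := by
  unfold pvGet2
  by_cases hj : j < size
  · rw [List.getD_eq_getElem _ ([]) (by simpa using hj), List.getElem_replicate]
    by_cases hr : r < Kn
    · rw [List.getD_eq_getElem _ (0 : Int) (by simpa using hr), List.getElem_replicate]
    · rw [List.getD_eq_default _ _ (by simpa using Nat.le_of_not_lt hr)]
  · rw [List.getD_eq_default (List.replicate size (List.replicate Kn (0 : Int))) ([])
      (by simpa using Nat.le_of_not_lt hj)]
    simp

theorem pv_dpInit (size Kn : Nat) (hs : 0 < size) (hk : 0 < Kn) :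
    pvShape size Kn (pvSet2 (List.replicate size (List.replicate Kn (0 : Int))) 0 0 1) ∧
    ∀ j, ∀ r, pvGet2 (pvSet2 (List.replicate size (List.replicate Kn (0 : Int))) 0 0 1) j r
      = if j = 0 ∧ r = 0 then 1 else 0 := by
  have hSrep : pvShape size Kn (List.replicate size (List.replicate Kn (0 : Int))) := by
    refine ⟨by simp, ?_⟩
    intro j hj
    rw [List.getD_eq_getElem _ ([]) (by simpa using hj), List.getElem_replicate]
    simp
  refine ⟨pv_shape_set2 size Kn _ hSrep 0 0 1, ?_⟩
  intro j r
  by_cases hj : j = 0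
  · subst hj
    rw [pv_get2_set2_self size Kn _ hSrep 0 hs 0 hk 1 r]
    by_cases hr : r = 0
    · subst hr; simp
    · rw [if_neg hr, if_neg (by simp [hr]), pv_get2_replicate]
  · rw [pv_get2_set2_ne _ 0 0 1 j r hj, pv_get2_replicate, if_neg (by simp [hj])]

-- ---- A's push step: inner remainder loop ----
theorem pv_KfoldA (K : Int) (hK : 1 ≤ K) (size : Nat) (mi ul : Int) (t nm : Nat)
    (hne : nm ≠ t) (hnm : nm < size) :
    ∀ (ks : List Nat) (dp : List (List Int)), pvShape size K.toNat dp →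
    pvShape size K.toNat (ks.foldl (fun dp (k : Nat) =>
        if pvGet2 dp t k ≠ 0 then
          pvSet2 dp nm ((PySem.Int.mod (mi * ul + (k : Int)) K).toNat)
            (pvGet2 dp nm ((PySem.Int.mod (mi * ul + (k : Int)) K).toNat) + pvGet2 dp t k)
        else dp) dp) ∧
    (∀ j r, j ≠ nm → pvGet2 (ks.foldl (fun dp (k : Nat) =>
        if pvGet2 dp t k ≠ 0 then
          pvSet2 dp nm ((PySem.Int.mod (mi * ul + (k : Int)) K).toNat)
            (pvGet2 dp nm ((PySem.Int.mod (mi * ul + (k : Int)) K).toNat) + pvGet2 dp t k)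
        else dp) dp) j r = pvGet2 dp j r) ∧
    (∀ r, pvGet2 (ks.foldl (fun dp (k : Nat) =>
        if pvGet2 dp t k ≠ 0 then
          pvSet2 dp nm ((PySem.Int.mod (mi * ul + (k : Int)) K).toNat)
            (pvGet2 dp nm ((PySem.Int.mod (mi * ul + (k : Int)) K).toNat) + pvGet2 dp t k)
        else dp) dp) nm r
      = pvGet2 dp nm r + (ks.map (fun k => if pvTgt K mi ul k = r then pvGet2 dp t k else 0)).sum) := by
  intro ks
  induction ks with
  | nil => intro dp hS; exact ⟨hS, fun j r _ => rfl, fun r => by simp⟩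
  | cons k ks ih =>
    intro dp hS
    simp only [List.foldl_cons]
    by_cases hv : pvGet2 dp t k ≠ 0
    · rw [if_pos hv]
      have htgt : pvTgt K mi ul k < K.toNat := pv_tgt_lt K mi ul hK k
      have htgt' : (PySem.Int.mod (mi * ul + (k : Int)) K).toNat = pvTgt K mi ul k := rfl
      rw [htgt']
      have hS1 := pv_shape_set2 size K.toNat dp hS nm (pvTgt K mi ul k)
        (pvGet2 dp nm (pvTgt K mi ul k) + pvGet2 dp t k)
      obtain ⟨ihS, ihne, ihv⟩ := ih _ hS1
      have hkeep : ∀ j r, j ≠ nm →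
          pvGet2 (pvSet2 dp nm (pvTgt K mi ul k) (pvGet2 dp nm (pvTgt K mi ul k) + pvGet2 dp t k)) j r
          = pvGet2 dp j r := by
        intro j r hj
        exact pv_get2_set2_ne dp nm (pvTgt K mi ul k) _ j r hj
      have hsrc : ∀ k', pvGet2 (pvSet2 dp nm (pvTgt K mi ul k) (pvGet2 dp nm (pvTgt K mi ul k) + pvGet2 dp t k)) t k'
          = pvGet2 dp t k' := fun k' => hkeep t k' (fun h => hne h.symm)
      refine ⟨ihS, ?_, ?_⟩
      · intro j r hj
        rw [ihne j r hj, hkeep j r hj]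
      · intro r
        rw [ihv r]
        have hself := pv_get2_set2_self size K.toNat dp hS nm hnm (pvTgt K mi ul k) htgt
          (pvGet2 dp nm (pvTgt K mi ul k) + pvGet2 dp t k) r
        rw [hself]
        have hmap : (ks.map (fun k' => if pvTgt K mi ul k' = r
            then pvGet2 (pvSet2 dp nm (pvTgt K mi ul k) (pvGet2 dp nm (pvTgt K mi ul k) + pvGet2 dp t k)) t k'
            else 0)) = ks.map (fun k' => if pvTgt K mi ul k' = r then pvGet2 dp t k' else 0) := by
          apply List.map_congr_left
          intro k' _
          rw [hsrc k']
        rw [hmap, List.map_cons, List.sum_cons]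
        by_cases hr : r = pvTgt K mi ul k
        · subst hr
          rw [if_pos rfl, if_pos rfl]
          ring
        · rw [if_neg hr, if_neg (fun hh : pvTgt K mi ul k = r => hr hh.symm)]
          ring
    · rw [if_neg hv]
      push_neg at hv
      obtain ⟨ihS, ihne, ihv⟩ := ih dp hS
      refine ⟨ihS, ihne, ?_⟩
      intro r
      rw [ihv r, List.map_cons, List.sum_cons, hv]
      simp

-- ---- A's push step: loop over the digit to place ----
theorem pv_ifoldA (K : Int) (hK : 1 ≤ K) (mods : List Int) (M : Nat) (ul : Int) (t : Nat)
    (ht : t < 2 ^ M) :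
    ∀ (l : List Nat), (∀ i ∈ l, i < M) → ∀ dp : List (List Int), pvShape (2 ^ M) K.toNat dp →
    pvShape (2 ^ M) K.toNat (l.foldl (fun dp i =>
        if t.testBit i then dp
        else (List.range K.toNat).foldl (fun dp (k : Nat) =>
            if pvGet2 dp t k ≠ 0 then
              pvSet2 dp (t ||| 2 ^ i) ((PySem.Int.mod (mods.getD i 0 * ul + (k : Int)) K).toNat)
                (pvGet2 dp (t ||| 2 ^ i) ((PySem.Int.mod (mods.getD i 0 * ul + (k : Int)) K).toNat) + pvGet2 dp t k)
            else dp) dp) dp) ∧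
    ∀ j r, pvGet2 (l.foldl (fun dp i =>
        if t.testBit i then dp
        else (List.range K.toNat).foldl (fun dp (k : Nat) =>
            if pvGet2 dp t k ≠ 0 then
              pvSet2 dp (t ||| 2 ^ i) ((PySem.Int.mod (mods.getD i 0 * ul + (k : Int)) K).toNat)
                (pvGet2 dp (t ||| 2 ^ i) ((PySem.Int.mod (mods.getD i 0 * ul + (k : Int)) K).toNat) + pvGet2 dp t k)
            else dp) dp) dp) j r
      = pvGet2 dp j r + (l.map (fun i =>
          if t.testBit i = false ∧ t ||| 2 ^ i = j
          then ((List.range K.toNat).map (fun k =>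
            if pvTgt K (mods.getD i 0) ul k = r then pvGet2 dp t k else 0)).sum
          else 0)).sum := by
  intro l
  induction l with
  | nil => intro _ dp hS; exact ⟨hS, fun j r => by simp⟩
  | cons i l ih =>
    intro hl dp hS
    simp only [List.foldl_cons]
    have hil : i < M := hl i (by simp)
    have hl' : ∀ x ∈ l, x < M := fun x hx => hl x (by simp [hx])
    by_cases hb : t.testBit i
    · rw [if_pos hb]
      obtain ⟨ihS, ihv⟩ := ih hl' dp hS
      refine ⟨ihS, ?_⟩
      intro j r
      rw [ihv j r, List.map_cons, List.sum_cons, if_neg (by simp [hb])]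
      ring
    · rw [if_neg hb]
      have hbf : t.testBit i = false := by simpa using hb
      have hnmbit : (t ||| 2 ^ i).testBit i = true := by simp [Nat.testBit_or]
      have hne : t ||| 2 ^ i ≠ t := by
        intro hh
        rw [hh] at hnmbit
        rw [hbf] at hnmbit
        exact Bool.false_ne_true hnmbit
      have hnm : t ||| 2 ^ i < 2 ^ M := pv_or_lt M t i ht hil
      obtain ⟨hS1, hkeep, hval⟩ := pv_KfoldA K hK (2 ^ M) (mods.getD i 0) ul t (t ||| 2 ^ i)
        hne hnm (List.range K.toNat) dp hS
      obtain ⟨ihS, ihv⟩ := ih hl' _ hS1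
      refine ⟨ihS, ?_⟩
      intro j r
      rw [ihv j r]
      have hsrc : ∀ k', pvGet2 ((List.range K.toNat).foldl (fun dp (k : Nat) =>
          if pvGet2 dp t k ≠ 0 then
            pvSet2 dp (t ||| 2 ^ i) ((PySem.Int.mod (mods.getD i 0 * ul + (k : Int)) K).toNat)
              (pvGet2 dp (t ||| 2 ^ i) ((PySem.Int.mod (mods.getD i 0 * ul + (k : Int)) K).toNat) + pvGet2 dp t k)
          else dp) dp) t k' = pvGet2 dp t k' :=
        fun k' => hkeep t k' (fun h => hne h.symm)
      have hmap : (l.map (fun i' =>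
          if t.testBit i' = false ∧ t ||| 2 ^ i' = j
          then ((List.range K.toNat).map (fun k =>
            if pvTgt K (mods.getD i' 0) ul k = r
            then pvGet2 ((List.range K.toNat).foldl (fun dp (k : Nat) =>
              if pvGet2 dp t k ≠ 0 then
                pvSet2 dp (t ||| 2 ^ i) ((PySem.Int.mod (mods.getD i 0 * ul + (k : Int)) K).toNat)
                  (pvGet2 dp (t ||| 2 ^ i) ((PySem.Int.mod (mods.getD i 0 * ul + (k : Int)) K).toNat) + pvGet2 dp t k)
              else dp) dp) t k else 0)).sum
          else 0))
          = l.map (fun i' =>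
          if t.testBit i' = false ∧ t ||| 2 ^ i' = j
          then ((List.range K.toNat).map (fun k =>
            if pvTgt K (mods.getD i' 0) ul k = r then pvGet2 dp t k else 0)).sum
          else 0) := by
        apply List.map_congr_left
        intro x _
        congr 1
        congr 1
        apply List.map_congr_left
        intro k _
        rw [hsrc k]
      rw [hmap, List.map_cons, List.sum_cons]
      by_cases hj : j = t ||| 2 ^ i
      · subst hj
        rw [hval r, if_pos ⟨hbf, rfl⟩]
        ring
      · rw [hkeep j r hj, if_neg (fun hh => hj hh.2.symm)]
        ring

theorem pv_stepA (K : Int) (hK : 1 ≤ K) (mods : List Int) (deg : List Nat) (n M : Nat)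
    (hnM : n ≤ M) (dp : List (List Int)) (t : Nat) (ht : t < 2 ^ M)
    (hS : pvShape (2 ^ M) K.toNat dp)
    (hinv : ∀ j, j < 2 ^ M → ∀ r, r < K.toNat → pvGet2 dp j r
      = (if j = 0 ∧ r = 0 then 1 else 0) +
        (((List.range n).filter (fun i => j.testBit i && decide (j ^^^ 2 ^ i < t))).map
          (fun i => pvContrib K mods deg n K.toNat i (j ^^^ 2 ^ i) r)).sum) :
    pvShape (2 ^ M) K.toNat (pvAStep K mods deg n K.toNat dp t) ∧
    ∀ j, j < 2 ^ M → ∀ r, r < K.toNat → pvGet2 (pvAStep K mods deg n K.toNat dp t) j r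
      = (if j = 0 ∧ r = 0 then 1 else 0) +
        (((List.range n).filter (fun i => j.testBit i && decide (j ^^^ 2 ^ i < t + 1))).map
          (fun i => pvContrib K mods deg n K.toNat i (j ^^^ 2 ^ i) r)).sum := by
  have hbody : pvAStep K mods deg n K.toNat dp t
      = (List.range n).foldl (fun dp i =>
          if t.testBit i then dp
          else (List.range K.toNat).foldl (fun dp (k : Nat) =>
            if pvGet2 dp t k ≠ 0 then
              pvSet2 dp (t ||| 2 ^ i) ((PySem.Int.mod (mods.getD i 0 * pvUl deg n K t + (k : Int)) K).toNat)
                (pvGet2 dp (t ||| 2 ^ i) ((PySem.Int.mod (mods.getD i 0 * pvUl deg n K t + (k : Int)) K).toNat) + pvGet2 dp t k)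
            else dp) dp) dp := rfl
  rw [hbody]
  have hl : ∀ i ∈ List.range n, i < M := fun i hi => by
    have := List.mem_range.mp hi; omega
  obtain ⟨hS', hv'⟩ := pv_ifoldA K hK mods M (pvUl deg n K t) t ht (List.range n) hl dp hS
  refine ⟨hS', ?_⟩
  intro j hj r hr
  rw [hv' j r, hinv j hj r hr]
  have hsrcG : ∀ k, k < K.toNat → pvGet2 dp t k = pvG K mods deg n K.toNat t k := by
    intro k hk
    rw [hinv t ht k hk]
    have hfil : (List.range n).filter (fun i => t.testBit i && decide (t ^^^ 2 ^ i < t))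
        = (List.range n).filter (fun i => t.testBit i) := by
      apply List.filter_congr
      intro x _
      by_cases hb : t.testBit x
      · have : t ^^^ 2 ^ x < t := pv_xor_lt t x hb
        simp [hb, this]
      · simp [hb]
    rw [hfil, ← pvG_eq]
  have hS2 : ∀ i r', ((List.range K.toNat).map (fun k =>
      if pvTgt K (mods.getD i 0) (pvUl deg n K t) k = r' then pvGet2 dp t k else 0)).sum
      = pvContrib K mods deg n K.toNat i t r' := by
    intro i r'
    unfold pvContrib
    congr 1
    apply List.map_congr_left
    intro k hk
    have hkK : k < K.toNat := List.mem_range.mp hk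
    rw [hsrcG k hkK]
  rw [pv_sum_filter_map (fun i => j.testBit i && decide (j ^^^ 2 ^ i < t))
      (fun i => pvContrib K mods deg n K.toNat i (j ^^^ 2 ^ i) r) (List.range n),
    pv_sum_filter_map (fun i => j.testBit i && decide (j ^^^ 2 ^ i < t + 1))
      (fun i => pvContrib K mods deg n K.toNat i (j ^^^ 2 ^ i) r) (List.range n), add_assoc]
  congr 1
  rw [← pv_sum_map_add (List.range n)]
  congr 1
  apply List.map_congr_left
  intro i _
  rw [hS2 i r]
  by_cases hb : j.testBit i = true
  · by_cases hx : j ^^^ 2 ^ i < t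
    · have hxne : j ^^^ 2 ^ i ≠ t := by omega
      have hmid : ¬ (t.testBit i = false ∧ t ||| 2 ^ i = j) := by
        intro hc
        exact hxne ((pv_bit_corr t j i).mpr hc).2
      simp [hb, hx, hmid, show j ^^^ 2 ^ i < t + 1 by omega]
    · by_cases hxe : j ^^^ 2 ^ i = t
      · have hmid : t.testBit i = false ∧ t ||| 2 ^ i = j := (pv_bit_corr t j i).mp ⟨hb, hxe⟩
        simp [hb, hx, hmid, hxe, show j ^^^ 2 ^ i < t + 1 by omega]
      · have hmid : ¬ (t.testBit i = false ∧ t ||| 2 ^ i = j) := by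
          intro hc
          exact hxe ((pv_bit_corr t j i).mpr hc).2
        simp [hb, hx, hmid, show ¬ (j ^^^ 2 ^ i < t + 1) by omega]
  · have hbf : j.testBit i = false := by simpa using hb
    have hmid : ¬ (t.testBit i = false ∧ t ||| 2 ^ i = j) := by
      intro hc
      have := (pv_bit_corr t j i).mpr hc
      rw [hbf] at this
      exact Bool.false_ne_true this.1
    simp [hbf, hmid]

theorem pv_outerA (K : Int) (hK : 1 ≤ K) (mods : List Int) (deg : List Nat) (n M : Nat)
    (hnM : n ≤ M) (hKn : 0 < K.toNat) (c : Nat) (hc : c ≤ 2 ^ M) :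
    pvShape (2 ^ M) K.toNat ((List.range c).foldl (pvAStep K mods deg n K.toNat)
      (pvSet2 (List.replicate (2 ^ M) (List.replicate K.toNat (0 : Int))) 0 0 1)) ∧
    ∀ j, j < 2 ^ M → ∀ r, r < K.toNat →
      pvGet2 ((List.range c).foldl (pvAStep K mods deg n K.toNat)
        (pvSet2 (List.replicate (2 ^ M) (List.replicate K.toNat (0 : Int))) 0 0 1)) j r
      = (if j = 0 ∧ r = 0 then 1 else 0) +
        (((List.range n).filter (fun i => j.testBit i && decide (j ^^^ 2 ^ i < c))).map
          (fun i => pvContrib K mods deg n K.toNat i (j ^^^ 2 ^ i) r)).sum := by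
  induction c with
  | zero =>
    obtain ⟨hS0, hv0⟩ := pv_dpInit (2 ^ M) K.toNat (Nat.two_pow_pos M) hKn
    refine ⟨hS0, ?_⟩
    intro j hj r hr
    rw [List.range_zero, List.foldl_nil, hv0 j r]
    have hfil : (List.range n).filter (fun i => j.testBit i && decide (j ^^^ 2 ^ i < 0)) = [] := by
      apply List.filter_eq_nil_iff.mpr
      intro x _
      simp
    rw [hfil]
    simp
  | succ c ihc =>
    obtain ⟨ihS, ihv⟩ := ihc (by omega)
    rw [List.range_succ, List.foldl_append, List.foldl_cons, List.foldl_nil]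
    exact pv_stepA K hK mods deg n M hnM _ c (by omega) ihS ihv

-- ---- B side: memo invariant and solve correctness ----
theorem pv_bit_iff (m i : Nat) : (m >>> i &&& 1 = 1) ↔ m.testBit i = true := by
  simp [Nat.testBit, Nat.and_one_is_mod]

theorem pv_getD_replicate (Kn r : Nat) : (List.replicate Kn (0 : Int)).getD r 0 = 0 := by
  by_cases hr : r < Kn
  · rw [List.getD_eq_getElem _ _ (by simpa using hr), List.getElem_replicate]
  · rw [List.getD_eq_default _ _ (by simpa using Nat.le_of_not_lt hr)]

def pvGood (K : Int) (mods shift : List Int) (n : Nat) (memo : PySem.Dict Nat (List Int)) : Prop :=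
  (∃ v, memo.get? 0 = some v) ∧
  ∀ m v, memo.get? m = some v → v.length = K.toNat ∧
    ∀ r, v.getD r 0 = pvH K mods shift n K.toNat m r



-- B's inner 'for k in range(K)' accumulation loop
theorem pv_cntfold (K : Int) (hK : 1 ≤ K) (s m : Int) (sub : List Int) :
    ∀ (ks : List Nat) (cnt : List Int), cnt.length = K.toNat →
    (ks.foldl (fun cnt (k : Nat) =>
        let v := sub.getD k 0
        if v ≠ 0 then
          let t := (PySem.Int.mod ((k : Int) * s + m) K).toNat
          cnt.set t (cnt.getD t 0 + v)
        else cnt) cnt).length = K.toNat ∧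
    ∀ r, (ks.foldl (fun cnt (k : Nat) =>
        let v := sub.getD k 0
        if v ≠ 0 then
          let t := (PySem.Int.mod ((k : Int) * s + m) K).toNat
          cnt.set t (cnt.getD t 0 + v)
        else cnt) cnt).getD r 0
      = cnt.getD r 0 + (ks.map (fun k => if pvBTgt K s m k = r then sub.getD k 0 else 0)).sum := by
  intro ks
  induction ks with
  | nil => intro cnt h; exact ⟨h, fun r => by simp⟩
  | cons k ks ih =>
    intro cnt hlen
    rw [List.foldl_cons]
    by_cases hv : sub.getD k 0 ≠ 0
    · have hred : (let v := sub.getD k 0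
          if v ≠ 0 then
            let t := (PySem.Int.mod ((k : Int) * s + m) K).toNat
            cnt.set t (cnt.getD t 0 + v)
          else cnt)
          = cnt.set (pvBTgt K s m k) (cnt.getD (pvBTgt K s m k) 0 + sub.getD k 0) := by
        show (if sub.getD k 0 ≠ 0 then
          cnt.set (pvBTgt K s m k) (cnt.getD (pvBTgt K s m k) 0 + sub.getD k 0) else cnt) = _
        rw [if_pos hv]
      rw [hred]
      have htgt : pvBTgt K s m k < K.toNat := pv_btgt_lt K s m hK k
      have hset : (cnt.set (pvBTgt K s m k) (cnt.getD (pvBTgt K s m k) 0 + sub.getD k 0)).length = K.toNat := by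
        simp [hlen]
      obtain ⟨ihl, ihv⟩ := ih _ hset
      refine ⟨ihl, ?_⟩
      intro r
      rw [ihv r, pv_getD_set_lt _ _ (by omega) _ r]
      simp only [List.map_cons, List.sum_cons]
      by_cases hr : r = pvBTgt K s m k
      · subst hr; simp; ring
      · rw [if_neg hr, if_neg (fun hh : pvBTgt K s m k = r => hr hh.symm)]; ring
    · have hred : (let v := sub.getD k 0
          if v ≠ 0 then
            let t := (PySem.Int.mod ((k : Int) * s + m) K).toNat
            cnt.set t (cnt.getD t 0 + v)
          else cnt) = cnt := by
        show (if sub.getD k 0 ≠ 0 then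
          cnt.set (pvBTgt K s m k) (cnt.getD (pvBTgt K s m k) 0 + sub.getD k 0) else cnt) = _
        rw [if_neg hv]
      rw [hred]
      obtain ⟨ihl, ihv⟩ := ih cnt hlen
      refine ⟨ihl, ?_⟩
      intro r
      rw [ihv r]
      simp only [List.map_cons, List.sum_cons]
      push_neg at hv
      rw [hv]
      simp

-- unfolding equations for B's recursion
theorem pvSolveGo_nil (K : Int) (mods shift : List Int) (N : Int)
    (memo : PySem.Dict Nat (List Int)) (mask : Nat) (cnt : List Int) :
    pvSolveGo K mods shift N memo mask [] cnt = (memo, cnt) := by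
  rw [pvSolveGo]

theorem pvSolveGo_cons_pos (K : Int) (mods shift : List Int) (N : Int)
    (memo : PySem.Dict Nat (List Int)) (mask : Nat) (i : Int) (rest : List Int)
    (cnt : List Int) (hb : mask >>> i.toNat &&& 1 = 1) :
    pvSolveGo K mods shift N memo mask (i :: rest) cnt =
      pvSolveGo K mods shift N (pvSolve K mods shift N memo (mask ^^^ 1 <<< i.toNat)).1 mask rest
        ((List.range K.toNat).foldl (fun cnt (k : Nat) =>
          let v := (pvSolve K mods shift N memo (mask ^^^ 1 <<< i.toNat)).2.getD k 0
          if v ≠ 0 then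
            let t := (PySem.Int.mod ((k : Int) * (shift.getD i.toNat 0) + (mods.getD i.toNat 0)) K).toNat
            cnt.set t (cnt.getD t 0 + v)
          else cnt) cnt) := by
  rw [pvSolveGo]
  rw [dif_pos hb]

theorem pvSolveGo_cons_neg (K : Int) (mods shift : List Int) (N : Int)
    (memo : PySem.Dict Nat (List Int)) (mask : Nat) (i : Int) (rest : List Int)
    (cnt : List Int) (hb : ¬ mask >>> i.toNat &&& 1 = 1) :
    pvSolveGo K mods shift N memo mask (i :: rest) cnt =
      pvSolveGo K mods shift N memo mask rest cnt := by
  rw [pvSolveGo]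
  rw [dif_neg hb]

theorem pvSolve_cached (K : Int) (mods shift : List Int) (N : Int)
    (memo : PySem.Dict Nat (List Int)) (mask : Nat) (v : List Int)
    (h : memo.get? mask = some v) :
    pvSolve K mods shift N memo mask = (memo, v) := by
  rw [pvSolve, h]

theorem pvSolve_none (K : Int) (mods shift : List Int) (N : Int)
    (memo : PySem.Dict Nat (List Int)) (mask : Nat)
    (h : memo.get? mask = none) :
    pvSolve K mods shift N memo mask =
      ((pvSolveGo K mods shift N memo mask (PySem.List.pyRange 0 N 1)
          (List.replicate K.toNat (0 : Int))).1.insert mask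
        (pvSolveGo K mods shift N memo mask (PySem.List.pyRange 0 N 1)
          (List.replicate K.toNat (0 : Int))).2,
       (pvSolveGo K mods shift N memo mask (PySem.List.pyRange 0 N 1)
          (List.replicate K.toNat (0 : Int))).2) := by
  rw [pvSolve, h]

-- B's 'for i in range(N)' loop
theorem pv_go_correct (K : Int) (hK : 1 ≤ K) (mods shift : List Int) (N : Int) (mask : Nat)
    (IH : ∀ m', m' < mask → ∀ memo, pvGood K mods shift N.toNat memo →
      pvGood K mods shift N.toNat (pvSolve K mods shift N memo m').1 ∧
      (pvSolve K mods shift N memo m').2.length = K.toNat ∧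
      ∀ r, (pvSolve K mods shift N memo m').2.getD r 0 = pvH K mods shift N.toNat K.toNat m' r) :
    ∀ (is : List Int), (∀ i ∈ is, 0 ≤ i) → ∀ memo cnt, pvGood K mods shift N.toNat memo →
      cnt.length = K.toNat →
    pvGood K mods shift N.toNat (pvSolveGo K mods shift N memo mask is cnt).1 ∧
    (pvSolveGo K mods shift N memo mask is cnt).2.length = K.toNat ∧
    ∀ r, (pvSolveGo K mods shift N memo mask is cnt).2.getD r 0
      = cnt.getD r 0 + (is.map (fun i =>
          if mask.testBit i.toNat
          then pvContribH K mods shift N.toNat K.toNat i.toNat (mask ^^^ 2 ^ i.toNat) r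
          else 0)).sum := by
  intro is
  induction is with
  | nil =>
    intro _ memo cnt hGood hlen
    rw [pvSolveGo_nil]
    exact ⟨hGood, hlen, fun r => by simp⟩
  | cons i rest ih =>
    intro hnn memo cnt hGood hlen
    have hnn' : ∀ x ∈ rest, 0 ≤ x := fun x hx => hnn x (by simp [hx])
    by_cases hb : mask >>> i.toNat &&& 1 = 1
    · rw [pvSolveGo_cons_pos K mods shift N memo mask i rest cnt hb]
      have htb : mask.testBit i.toNat = true := (pv_bit_iff mask i.toNat).mp hb
      have hsh : (1 : Nat) <<< i.toNat = 2 ^ i.toNat := Nat.one_shiftLeft i.toNat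
      have hlt : mask ^^^ 1 <<< i.toNat < mask := by
        rw [hsh]; exact pv_xor_lt mask i.toNat htb
      obtain ⟨hG1, hL1, hV1⟩ := IH _ hlt memo hGood
      obtain ⟨hfl, hfv⟩ := pv_cntfold K hK (shift.getD i.toNat 0) (mods.getD i.toNat 0)
        (pvSolve K mods shift N memo (mask ^^^ 1 <<< i.toNat)).2 (List.range K.toNat) cnt hlen
      obtain ⟨ihG, ihL, ihV⟩ := ih hnn' (pvSolve K mods shift N memo (mask ^^^ 1 <<< i.toNat)).1 _ hG1 hfl
      refine ⟨ihG, ihL, ?_⟩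
      intro r
      rw [ihV r, hfv r]
      simp only [List.map_cons, List.sum_cons]
      rw [if_pos htb]
      have hcontrib : ((List.range K.toNat).map (fun k =>
          if pvBTgt K (shift.getD i.toNat 0) (mods.getD i.toNat 0) k = r
          then (pvSolve K mods shift N memo (mask ^^^ 1 <<< i.toNat)).2.getD k 0 else 0)).sum
          = pvContribH K mods shift N.toNat K.toNat i.toNat (mask ^^^ 2 ^ i.toNat) r := by
        unfold pvContribH
        congr 1
        apply List.map_congr_left
        intro k _
        rw [hV1 k, hsh]
      rw [hcontrib]
      ring
    · rw [pvSolveGo_cons_neg K mods shift N memo mask i rest cnt hb]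
      have htb : mask.testBit i.toNat = false := by
        rw [← Bool.not_eq_true, ← pv_bit_iff]
        exact hb
      obtain ⟨ihG, ihL, ihV⟩ := ih hnn' memo cnt hGood hlen
      refine ⟨ihG, ihL, ?_⟩
      intro r
      rw [ihV r]
      simp only [List.map_cons, List.sum_cons]
      rw [htb]
      simp

theorem pv_solve_correct (K : Int) (hK : 1 ≤ K) (mods shift : List Int) (N : Int)
    (mask : Nat) (memo : PySem.Dict Nat (List Int)) (hG : pvGood K mods shift N.toNat memo) :
    pvGood K mods shift N.toNat (pvSolve K mods shift N memo mask).1 ∧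
    (pvSolve K mods shift N memo mask).2.length = K.toNat ∧
    ∀ r, (pvSolve K mods shift N memo mask).2.getD r 0 = pvH K mods shift N.toNat K.toNat mask r := by
  induction mask using Nat.strong_induction_on generalizing memo with
  | _ mask IH =>
  cases hmem : memo.get? mask with
  | some v =>
    rw [pvSolve_cached K mods shift N memo mask v hmem]
    obtain ⟨hl, hv⟩ := hG.2 mask v hmem
    exact ⟨hG, hl, hv⟩
  | none =>
    have hmask0 : mask ≠ 0 := by
      intro h0
      obtain ⟨v0, hv0⟩ := hG.1
      rw [h0] at hmem
      rw [hmem] at hv0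
      simp at hv0
    rw [pvSolve_none K mods shift N memo mask hmem]
    have hnn : ∀ x ∈ PySem.List.pyRange 0 N 1, 0 ≤ x := by
      intro x hx
      exact ((PySem.List.mem_pyRange_one).mp hx).1
    obtain ⟨hG', hL', hV'⟩ := pv_go_correct K hK mods shift N mask IH
      (PySem.List.pyRange 0 N 1) hnn memo (List.replicate K.toNat 0) hG (by simp)
    have hval : ∀ r, (pvSolveGo K mods shift N memo mask (PySem.List.pyRange 0 N 1)
        (List.replicate K.toNat (0 : Int))).2.getD r 0 = pvH K mods shift N.toNat K.toNat mask r := by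
      intro r
      rw [hV' r, pv_getD_replicate, zero_add]
      rw [pvH_eq, if_neg (by simp [hmask0]), zero_add]
      rw [PySem.List.pyRange_one]
      simp only [Int.sub_zero]
      rw [List.map_map]
      have hmc : (List.range N.toNat).map ((fun i : Int =>
          if mask.testBit i.toNat
          then pvContribH K mods shift N.toNat K.toNat i.toNat (mask ^^^ 2 ^ i.toNat) r
          else 0) ∘ (fun k : Nat => (0 : Int) + (k : Int)))
          = (List.range N.toNat).map (fun i : Nat =>
          if mask.testBit i
          then pvContribH K mods shift N.toNat K.toNat i (mask ^^^ 2 ^ i) r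
          else 0) := by
        apply List.map_congr_left
        intro x _
        simp
      rw [hmc, ← pv_sum_filter_map (fun i => mask.testBit i)
        (fun i => pvContribH K mods shift N.toNat K.toNat i (mask ^^^ 2 ^ i) r) (List.range N.toNat)]
    refine ⟨?_, hL', hval⟩
    constructor
    · obtain ⟨v0, hv0⟩ := hG'.1
      exact ⟨v0, by rw [PySem.Dict.get?_insert_of_ne _ _ (Ne.symm hmask0), hv0]⟩
    · intro m v hv
      by_cases hm : m = mask
      · subst hm
        rw [PySem.Dict.get?_insert_self] at hv
        cases hv
        exact ⟨hL', hval⟩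
      · rw [PySem.Dict.get?_insert_of_ne _ _ hm] at hv
        exact hG'.2 m v hv

-- ---- pvG = pvH (suffix-DP and prefix-DP count the same permutations) ----
def pvS (n m : Nat) : Finset Nat := (Finset.range n).filter (fun i => m.testBit i = true)



theorem pv_lsum_filter (n : Nat) (p : Nat → Bool) (f : Nat → Int) :
    (((List.range n).filter p).map f).sum = ∑ i ∈ (Finset.range n).filter (fun i => p i = true), f i := by
  rw [Finset.sum_filter]
  show _ = ((List.range n).map fun i => if p i = true then f i else 0).sum
  induction (List.range n) with
  | nil => rfl
  | cons x xs ih => by_cases h : p x <;> simp [h, ih]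

theorem pvG_eqF (K : Int) (mods : List Int) (deg : List Nat) (n Kn : Nat) (m r : Nat) :
    pvG K mods deg n Kn m r =
      (if m = 0 ∧ r = 0 then 1 else 0) +
      ∑ i ∈ pvS n m, ∑ k ∈ Finset.range Kn,
        (if pvTgt K (mods.getD i 0) (pvUl deg n K (m ^^^ 2 ^ i)) k = r
         then pvG K mods deg n Kn (m ^^^ 2 ^ i) k else 0) := by
  rw [pvG_eq, pv_lsum_filter]
  rfl

theorem pvH_eqF (K : Int) (mods shift : List Int) (n Kn : Nat) (m r : Nat) :
    pvH K mods shift n Kn m r =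
      (if m = 0 ∧ r = 0 then 1 else 0) +
      ∑ i ∈ pvS n m, ∑ k ∈ Finset.range Kn,
        (if pvBTgt K (shift.getD i 0) (mods.getD i 0) k = r
         then pvH K mods shift n Kn (m ^^^ 2 ^ i) k else 0) := by
  rw [pvH_eq, pv_lsum_filter]
  rfl

theorem pv_S_mem (n m i : Nat) : i ∈ pvS n m ↔ i < n ∧ m.testBit i = true := by
  simp [pvS]

theorem pv_S_erase (n m i : Nat) (hb : m.testBit i = true) :
    pvS n (m ^^^ 2 ^ i) = (pvS n m).erase i := by
  ext j
  rw [pv_S_mem, Finset.mem_erase, pv_S_mem]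
  by_cases hj : j = i
  · subst hj
    simp [Nat.testBit_xor, hb]
  · simp [Nat.testBit_xor, Nat.testBit_two_pow, Ne.symm hj, hj]

theorem pv_foldl_if_add (P : Nat → Bool) (d : Nat → Nat) (l : List Nat) (a : Nat) :
    l.foldl (fun a i => if P i then a + d i else a) a
      = a + (l.map (fun i => if P i then d i else 0)).sum := by
  induction l generalizing a with
  | nil => simp
  | cons x xs ih => by_cases h : P x <;> simp [h, ih] <;> omega

theorem pv_sdeg_sum (deg : List Nat) (n m : Nat) :
    pvSdeg deg n m = ∑ i ∈ Finset.range n, (if m.testBit i then deg.getD i 0 else 0) := by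
  rw [pvSdeg, pv_foldl_if_add, Nat.zero_add]
  rfl

theorem pv_sdeg_xor (deg : List Nat) (n m j : Nat) (hj : j < n) (hb : m.testBit j = true) :
    pvSdeg deg n m = pvSdeg deg n (m ^^^ 2 ^ j) + deg.getD j 0 := by
  rw [pv_sdeg_sum, pv_sdeg_sum]
  have hjmem : j ∈ Finset.range n := Finset.mem_range.mpr hj
  rw [← Finset.add_sum_erase _ _ hjmem, ← Finset.add_sum_erase _ _ hjmem]
  have h1 : Nat.testBit (m ^^^ 2 ^ j) j = false := by simp [Nat.testBit_xor, hb]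
  have h2 : ∑ i ∈ (Finset.range n).erase j, (if m.testBit i then deg.getD i 0 else 0)
      = ∑ i ∈ (Finset.range n).erase j, (if (m ^^^ 2 ^ j).testBit i then deg.getD i 0 else 0) := by
    apply Finset.sum_congr rfl
    intro x hx
    have hxj : x ≠ j := (Finset.mem_erase.mp hx).1
    simp [Nat.testBit_xor, Nat.testBit_two_pow, Ne.symm hxj]
  rw [h2, hb, h1]
  simp
  omega

-- modular-arithmetic helpers (all via Int.ModEq-style emod identities)
theorem pv_mod_mul_right (K a b : Int) : (a * (b % K)) % K = (a * b) % K := by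
  conv_lhs => rw [Int.mul_emod, Int.emod_emod_of_dvd _ dvd_rfl]
  rw [← Int.mul_emod]



theorem pv_ite_add (c : Prop) [Decidable c] (x y : Int) :
    (if c then x + y else 0) = (if c then x else 0) + (if c then y else 0) := by
  split_ifs <;> simp

theorem pv_ite_sum {α : Type} (c : Prop) [Decidable c] (s : Finset α) (f : α → Int) :
    (if c then ∑ x ∈ s, f x else 0) = ∑ x ∈ s, (if c then f x else 0) := by
  split_ifs <;> simp

theorem pv_ite_swap (a b : Prop) [Decidable a] [Decidable b] (x : Int) :
    (if a then if b then x else 0 else 0) = (if b then if a then x else 0 else 0) := by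
  split_ifs <;> rfl

theorem pv_ite_and (a : Prop) [Decidable a] (k : Nat) :
    (if a ∧ k = 0 then (1 : Int) else 0) = if k = 0 then (if a then 1 else 0) else 0 := by
  split_ifs <;> simp_all

theorem pv_sdeg_zero (deg : List Nat) (n : Nat) : pvSdeg deg n 0 = 0 := by
  rw [pv_sdeg_sum]
  simp [Nat.zero_testBit]

theorem pv_tgt_single (K : Int) (hK : 1 ≤ K) (mi s : Int) (deg : List Nat) (n : Nat) :
    pvTgt K mi (pvUl deg n K 0) 0 = pvBTgt K s mi 0 := by
  have hKpos : (0 : Int) < K := by omega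
  rw [pvTgt, pvBTgt, pvUl, pv_sdeg_zero]
  rw [PySem.Int.mod_eq_emod_of_pos hKpos, PySem.Int.mod_eq_emod_of_pos hKpos,
    PySem.Int.mod_eq_emod_of_pos hKpos]
  norm_num
  rw [pv_mod_mul_right]
  norm_num

theorem pv_xor_right_comm (m a b : Nat) : m ^^^ a ^^^ b = m ^^^ b ^^^ a := by
  rw [Nat.xor_assoc, Nat.xor_assoc, Nat.xor_comm a b]

theorem pv_tgt_commute (K : Int) (hK : 1 ≤ K) (deg : List Nat) (n : Nat)
    (m i j : Nat) (hj : j < n) (hij : j ≠ i)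
    (hbi : m.testBit i = true) (hbj : m.testBit j = true)
    (ai mj sj : Int) (hsj : sj = PySem.Int.mod ((10 : Int) ^ deg.getD j 0) K) (k' : Nat) :
    pvTgt K ai (pvUl deg n K (m ^^^ 2 ^ i)) (pvBTgt K sj mj k')
    = pvBTgt K sj mj (pvTgt K ai (pvUl deg n K (m ^^^ 2 ^ i ^^^ 2 ^ j)) k') := by
  have hKpos : (0 : Int) < K := by omega
  have hKne : K ≠ 0 := by omega
  have hbj' : (m ^^^ 2 ^ i).testBit j = true := by
    simp [Nat.testBit_xor, Nat.testBit_two_pow, hbj]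
    exact fun h => hij h.symm
  have hsd : pvSdeg deg n (m ^^^ 2 ^ i)
      = pvSdeg deg n (m ^^^ 2 ^ i ^^^ 2 ^ j) + deg.getD j 0 :=
    pv_sdeg_xor deg n (m ^^^ 2 ^ i) j hj hbj'
  set a := ai
  set dj := deg.getD j 0
  set s2 := pvSdeg deg n (m ^^^ 2 ^ i ^^^ 2 ^ j)
  rw [pvTgt, pvTgt, pvBTgt, pvBTgt, pvUl, pvUl, hsd]
  rw [hsj]
  simp only [PySem.Int.mod_eq_emod_of_pos hKpos]
  congr 1
  rw [Int.toNat_of_nonneg (Int.emod_nonneg _ hKne), Int.toNat_of_nonneg (Int.emod_nonneg _ hKne)]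
  have h10 : ∀ e : Nat, ((10 : Int) ^ e % K) ≡ (10 : Int) ^ e [ZMOD K] :=
    fun e => Int.emod_emod_of_dvd _ dvd_rfl
  have e1 : (a * ((10 : Int) ^ (s2 + dj) % K) + (((k' : Int) * ((10 : Int) ^ dj % K) + mj) % K)) % K
      = (a * (10 : Int) ^ (s2 + dj) + ((k' : Int) * (10 : Int) ^ dj + mj)) % K := by
    have : (a * ((10 : Int) ^ (s2 + dj) % K) + (((k' : Int) * ((10 : Int) ^ dj % K) + mj) % K))
        ≡ (a * (10 : Int) ^ (s2 + dj) + ((k' : Int) * (10 : Int) ^ dj + mj)) [ZMOD K] := by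
      refine Int.ModEq.add ((h10 _).mul_left a) ?_
      refine (Int.emod_emod_of_dvd _ dvd_rfl : _ % K % K = _ % K).trans ?_
      exact Int.ModEq.add ((h10 dj).mul_left (k' : Int)) (Int.ModEq.refl mj)
    exact this
  have e2 : (((a * ((10 : Int) ^ s2 % K) + (k' : Int)) % K) * ((10 : Int) ^ dj % K) + mj) % K
      = ((a * (10 : Int) ^ s2 + (k' : Int)) * (10 : Int) ^ dj + mj) % K := by
    have hB : ((a * ((10 : Int) ^ s2 % K) + (k' : Int)) % K)
        ≡ (a * (10 : Int) ^ s2 + (k' : Int)) [ZMOD K] := by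
      refine (Int.emod_emod_of_dvd _ dvd_rfl : _ % K % K = _ % K).trans ?_
      exact Int.ModEq.add ((h10 s2).mul_left a) (Int.ModEq.refl (k' : Int))
    have : (((a * ((10 : Int) ^ s2 % K) + (k' : Int)) % K) * ((10 : Int) ^ dj % K) + mj)
        ≡ ((a * (10 : Int) ^ s2 + (k' : Int)) * (10 : Int) ^ dj + mj) [ZMOD K] :=
      Int.ModEq.add (hB.mul (h10 dj)) (Int.ModEq.refl mj)
    exact this
  rw [e1, e2]
  congr 1
  rw [pow_add]
  ring

theorem pv_GH (K : Int) (hK : 1 ≤ K) (modsA : List Int) (deg : List Nat)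
    (modsB shift : List Int) (n : Nat)
    (hmods : ∀ i, i < n → modsB.getD i 0 = modsA.getD i 0)
    (hsh : ∀ i, i < n → shift.getD i 0 = PySem.Int.mod ((10 : Int) ^ deg.getD i 0) K) :
    ∀ m r, pvG K modsA deg n K.toNat m r = pvH K modsB shift n K.toNat m r := by
  have hKn : 0 < K.toNat := by omega
  intro m
  induction m using Nat.strong_induction_on with
  | _ m IH =>
  intro r
  rw [pvG_eqF, pvH_eqF]
  congr 1
  -- expand the left side one more level (peel leftmost i, then rightmost j)
  have hL : ∀ i ∈ pvS n m,
      ∑ k ∈ Finset.range K.toNat,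
        (if pvTgt K (modsA.getD i 0) (pvUl deg n K (m ^^^ 2 ^ i)) k = r
         then pvG K modsA deg n K.toNat (m ^^^ 2 ^ i) k else 0)
      = (if m ^^^ 2 ^ i = 0
         then (if pvTgt K (modsA.getD i 0) (pvUl deg n K (m ^^^ 2 ^ i)) 0 = r then (1 : Int) else 0)
         else 0)
        + ∑ j ∈ (pvS n m).erase i, ∑ k' ∈ Finset.range K.toNat,
            (if pvTgt K (modsA.getD i 0) (pvUl deg n K (m ^^^ 2 ^ i))
                  (pvBTgt K (shift.getD j 0) (modsB.getD j 0) k') = r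
             then pvH K modsB shift n K.toNat (m ^^^ 2 ^ i ^^^ 2 ^ j) k' else 0) := by
    intro i hiS
    obtain ⟨hin, hbi⟩ := (pv_S_mem n m i).mp hiS
    have hlt : m ^^^ 2 ^ i < m := pv_xor_lt m i hbi
    have hstep1 : ∀ k ∈ Finset.range K.toNat,
        (if pvTgt K (modsA.getD i 0) (pvUl deg n K (m ^^^ 2 ^ i)) k = r
         then pvG K modsA deg n K.toNat (m ^^^ 2 ^ i) k else 0)
        = (if pvTgt K (modsA.getD i 0) (pvUl deg n K (m ^^^ 2 ^ i)) k = r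
           then (if m ^^^ 2 ^ i = 0 ∧ k = 0 then (1 : Int) else 0) else 0)
          + ∑ j ∈ (pvS n m).erase i,
              (if pvTgt K (modsA.getD i 0) (pvUl deg n K (m ^^^ 2 ^ i)) k = r
               then ∑ k' ∈ Finset.range K.toNat,
                 (if pvBTgt K (shift.getD j 0) (modsB.getD j 0) k' = k
                  then pvH K modsB shift n K.toNat (m ^^^ 2 ^ i ^^^ 2 ^ j) k' else 0)
               else 0) := by
      intro k _
      rw [IH _ hlt k, pvH_eqF, pv_S_erase n m i hbi, pv_ite_add, pv_ite_sum]
    rw [Finset.sum_congr rfl hstep1, Finset.sum_add_distrib]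
    congr 1
    · -- base part: only k = 0 can contribute, and only if m = 2^i
      have hsplit : ∀ k ∈ Finset.range K.toNat,
          (if pvTgt K (modsA.getD i 0) (pvUl deg n K (m ^^^ 2 ^ i)) k = r
           then (if m ^^^ 2 ^ i = 0 ∧ k = 0 then (1 : Int) else 0) else 0)
          = (if k = 0
             then (if m ^^^ 2 ^ i = 0
                   then (if pvTgt K (modsA.getD i 0) (pvUl deg n K (m ^^^ 2 ^ i)) k = r then (1 : Int) else 0)
                   else 0)
             else 0) := by
        intro k _
        rw [pv_ite_and]
        rw [pv_ite_swap]
        congr 1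
        rw [pv_ite_swap]
      rw [Finset.sum_congr rfl hsplit, Finset.sum_ite_eq' (Finset.range K.toNat) 0]
      rw [if_pos (Finset.mem_range.mpr hKn)]
    · -- double part: swap the k-sum inside, then collapse it
      rw [Finset.sum_comm]
      apply Finset.sum_congr rfl
      intro j _
      have hpush : ∀ k ∈ Finset.range K.toNat,
          (if pvTgt K (modsA.getD i 0) (pvUl deg n K (m ^^^ 2 ^ i)) k = r
           then ∑ k' ∈ Finset.range K.toNat,
             (if pvBTgt K (shift.getD j 0) (modsB.getD j 0) k' = k
              then pvH K modsB shift n K.toNat (m ^^^ 2 ^ i ^^^ 2 ^ j) k' else 0)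
           else 0)
          = ∑ k' ∈ Finset.range K.toNat,
             (if pvTgt K (modsA.getD i 0) (pvUl deg n K (m ^^^ 2 ^ i)) k = r
              then (if pvBTgt K (shift.getD j 0) (modsB.getD j 0) k' = k
                    then pvH K modsB shift n K.toNat (m ^^^ 2 ^ i ^^^ 2 ^ j) k' else 0) else 0) :=
        fun k _ => pv_ite_sum _ _ _
      rw [Finset.sum_congr rfl hpush, Finset.sum_comm]
      apply Finset.sum_congr rfl
      intro k' _
      have hswap : ∀ k ∈ Finset.range K.toNat,
          (if pvTgt K (modsA.getD i 0) (pvUl deg n K (m ^^^ 2 ^ i)) k = r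
           then (if pvBTgt K (shift.getD j 0) (modsB.getD j 0) k' = k
                 then pvH K modsB shift n K.toNat (m ^^^ 2 ^ i ^^^ 2 ^ j) k' else 0) else 0)
          = (if pvBTgt K (shift.getD j 0) (modsB.getD j 0) k' = k
             then (if pvTgt K (modsA.getD i 0) (pvUl deg n K (m ^^^ 2 ^ i)) k = r
                   then pvH K modsB shift n K.toNat (m ^^^ 2 ^ i ^^^ 2 ^ j) k' else 0) else 0) :=
        fun k _ => pv_ite_swap _ _ _
      rw [Finset.sum_congr rfl hswap, Finset.sum_ite_eq (Finset.range K.toNat)]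
      rw [if_pos (Finset.mem_range.mpr (pv_btgt_lt K _ _ hK k'))]
  -- expand the right side one more level (peel rightmost j, then leftmost i)
  have hR : ∀ j ∈ pvS n m,
      ∑ k ∈ Finset.range K.toNat,
        (if pvBTgt K (shift.getD j 0) (modsB.getD j 0) k = r
         then pvH K modsB shift n K.toNat (m ^^^ 2 ^ j) k else 0)
      = (if m ^^^ 2 ^ j = 0
         then (if pvBTgt K (shift.getD j 0) (modsB.getD j 0) 0 = r then (1 : Int) else 0)
         else 0)
        + ∑ i ∈ (pvS n m).erase j, ∑ k' ∈ Finset.range K.toNat,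
            (if pvBTgt K (shift.getD j 0) (modsB.getD j 0)
                  (pvTgt K (modsA.getD i 0) (pvUl deg n K (m ^^^ 2 ^ i ^^^ 2 ^ j)) k') = r
             then pvH K modsB shift n K.toNat (m ^^^ 2 ^ i ^^^ 2 ^ j) k' else 0) := by
    intro j hjS
    obtain ⟨hjn, hbj⟩ := (pv_S_mem n m j).mp hjS
    have hlt : m ^^^ 2 ^ j < m := pv_xor_lt m j hbj
    have hstep1 : ∀ k ∈ Finset.range K.toNat,
        (if pvBTgt K (shift.getD j 0) (modsB.getD j 0) k = r
         then pvH K modsB shift n K.toNat (m ^^^ 2 ^ j) k else 0)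
        = (if pvBTgt K (shift.getD j 0) (modsB.getD j 0) k = r
           then (if m ^^^ 2 ^ j = 0 ∧ k = 0 then (1 : Int) else 0) else 0)
          + ∑ i ∈ (pvS n m).erase j,
              (if pvBTgt K (shift.getD j 0) (modsB.getD j 0) k = r
               then ∑ k' ∈ Finset.range K.toNat,
                 (if pvTgt K (modsA.getD i 0) (pvUl deg n K (m ^^^ 2 ^ i ^^^ 2 ^ j)) k' = k
                  then pvH K modsB shift n K.toNat (m ^^^ 2 ^ i ^^^ 2 ^ j) k' else 0)
               else 0) := by
      intro k _
      rw [← IH _ hlt k, pvG_eqF, pv_S_erase n m j hbj, pv_ite_add, pv_ite_sum]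
      congr 1
      apply Finset.sum_congr rfl
      intro i hi
      have hbib : m.testBit i = true := ((pv_S_mem n m i).mp (Finset.mem_of_mem_erase hi)).2
      have hine : i ≠ j := (Finset.mem_erase.mp hi).1
      have hlt2 : m ^^^ 2 ^ j ^^^ 2 ^ i < m := by
        have hbi' : (m ^^^ 2 ^ j).testBit i = true := by
          simp [Nat.testBit_xor, Nat.testBit_two_pow, hbib]
          exact fun h => hine h.symm
        have := pv_xor_lt (m ^^^ 2 ^ j) i hbi'
        omega
      congr 1
      apply Finset.sum_congr rfl
      intro k' _
      have hlt2' : m ^^^ 2 ^ i ^^^ 2 ^ j < m := by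
        rw [pv_xor_right_comm m (2 ^ i) (2 ^ j)]
        exact hlt2
      rw [pv_xor_right_comm m (2 ^ j) (2 ^ i), IH _ hlt2' k']
    rw [Finset.sum_congr rfl hstep1, Finset.sum_add_distrib]
    congr 1
    · have hsplit : ∀ k ∈ Finset.range K.toNat,
          (if pvBTgt K (shift.getD j 0) (modsB.getD j 0) k = r
           then (if m ^^^ 2 ^ j = 0 ∧ k = 0 then (1 : Int) else 0) else 0)
          = (if k = 0
             then (if m ^^^ 2 ^ j = 0
                   then (if pvBTgt K (shift.getD j 0) (modsB.getD j 0) k = r then (1 : Int) else 0)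
                   else 0)
             else 0) := by
        intro k _
        rw [pv_ite_and]
        rw [pv_ite_swap]
        congr 1
        rw [pv_ite_swap]
      rw [Finset.sum_congr rfl hsplit, Finset.sum_ite_eq' (Finset.range K.toNat) 0]
      rw [if_pos (Finset.mem_range.mpr hKn)]
    · rw [Finset.sum_comm]
      apply Finset.sum_congr rfl
      intro i _
      have hpush : ∀ k ∈ Finset.range K.toNat,
          (if pvBTgt K (shift.getD j 0) (modsB.getD j 0) k = r
           then ∑ k' ∈ Finset.range K.toNat,
             (if pvTgt K (modsA.getD i 0) (pvUl deg n K (m ^^^ 2 ^ i ^^^ 2 ^ j)) k' = k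
              then pvH K modsB shift n K.toNat (m ^^^ 2 ^ i ^^^ 2 ^ j) k' else 0)
           else 0)
          = ∑ k' ∈ Finset.range K.toNat,
             (if pvBTgt K (shift.getD j 0) (modsB.getD j 0) k = r
              then (if pvTgt K (modsA.getD i 0) (pvUl deg n K (m ^^^ 2 ^ i ^^^ 2 ^ j)) k' = k
                    then pvH K modsB shift n K.toNat (m ^^^ 2 ^ i ^^^ 2 ^ j) k' else 0) else 0) :=
        fun k _ => pv_ite_sum _ _ _
      rw [Finset.sum_congr rfl hpush, Finset.sum_comm]
      apply Finset.sum_congr rfl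
      intro k' _
      have hswap : ∀ k ∈ Finset.range K.toNat,
          (if pvBTgt K (shift.getD j 0) (modsB.getD j 0) k = r
           then (if pvTgt K (modsA.getD i 0) (pvUl deg n K (m ^^^ 2 ^ i ^^^ 2 ^ j)) k' = k
                 then pvH K modsB shift n K.toNat (m ^^^ 2 ^ i ^^^ 2 ^ j) k' else 0) else 0)
          = (if pvTgt K (modsA.getD i 0) (pvUl deg n K (m ^^^ 2 ^ i ^^^ 2 ^ j)) k' = k
             then (if pvBTgt K (shift.getD j 0) (modsB.getD j 0) k = r
                   then pvH K modsB shift n K.toNat (m ^^^ 2 ^ i ^^^ 2 ^ j) k' else 0) else 0) :=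
        fun k _ => pv_ite_swap _ _ _
      rw [Finset.sum_congr rfl hswap, Finset.sum_ite_eq (Finset.range K.toNat)]
      rw [if_pos (Finset.mem_range.mpr (pv_tgt_lt K _ _ hK k'))]
  rw [Finset.sum_congr rfl hL, Finset.sum_congr rfl hR,
    Finset.sum_add_distrib, Finset.sum_add_distrib]
  congr 1
  · -- base parts agree termwise
    apply Finset.sum_congr rfl
    intro i hiS
    obtain ⟨hin, -⟩ := (pv_S_mem n m i).mp hiS
    by_cases h0 : m ^^^ 2 ^ i = 0
    · rw [if_pos h0, if_pos h0, h0, hmods i hin]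
      rw [pv_tgt_single K hK (modsA.getD i 0) (shift.getD i 0) deg n]
    · rw [if_neg h0, if_neg h0]
  · -- double parts agree after exchanging the two peeled indices
    rw [Finset.sum_comm' (t' := pvS n m) (s' := fun i => (pvS n m).erase i)
      (by
        intro j i
        simp only [Finset.mem_erase]
        constructor
        · rintro ⟨hj, hij, hi⟩
          exact ⟨⟨fun h => hij h.symm |>.elim, hj⟩, hi⟩  -- fixed below if broken
        · rintro ⟨⟨hji, hj⟩, hi⟩
          exact ⟨hj, fun h => hji h.symm |>.elim, hi⟩)]
    apply Finset.sum_congr rfl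
    intro i hiS
    apply Finset.sum_congr rfl
    intro j hj
    apply Finset.sum_congr rfl
    intro k' _
    obtain ⟨hin, hbi⟩ := (pv_S_mem n m i).mp hiS
    obtain ⟨hji, hjS⟩ := Finset.mem_erase.mp hj
    obtain ⟨hjn, hbj⟩ := (pv_S_mem n m j).mp hjS
    rw [pv_tgt_commute K hK deg n m j i hin (fun h => hji h.symm) hbj hbi
      (modsA.getD j 0) (modsB.getD i 0) (shift.getD i 0) (hsh i hin) k']

set_option maxHeartbeats 1600000 in
theorem pv_main (N : Int) (numbers : List Int) (K : Int) (hK : 1 ≤ K)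
    (hN : N ≤ (numbers.length : Int)) :
    get_K_divided_up N numbers K = get_K_divided_up_alt N numbers K := by
  have hnM : N.toNat ≤ numbers.length := Int.toNat_le.mpr hN
  have hKn : 0 < K.toNat := by omega
  have hsz : 0 < 2 ^ numbers.length := Nat.two_pow_pos numbers.length
  set mB := (PySem.List.pyRange 0 N 1).map (fun i => PySem.Int.mod (numbers.getD i.toNat 0) K)
    with hmB
  set sB := (PySem.List.pyRange 0 N 1).map
    (fun i => PySem.Int.powMod 10 (PySem.Int.toStr (numbers.getD i.toNat 0)).length K) with hsB
  -- A's final table row is pvG of the full mask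
  obtain ⟨hSA, hvA⟩ := pv_outerA K hK (pvMods numbers K) (pvDeg numbers) N.toNat
    numbers.length hnM hKn (2 ^ numbers.length) (le_refl _)
  have hA : ∀ j, j < 2 ^ numbers.length → ∀ r, r < K.toNat →
      pvGet2 ((List.range (2 ^ numbers.length)).foldl
        (pvAStep K (pvMods numbers K) (pvDeg numbers) N.toNat K.toNat)
        (pvSet2 (List.replicate (2 ^ numbers.length) (List.replicate K.toNat (0 : Int))) 0 0 1)) j r
      = pvG K (pvMods numbers K) (pvDeg numbers) N.toNat K.toNat j r := by
    intro j hj r hr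
    rw [hvA j hj r hr]
    have hfil : (List.range N.toNat).filter
        (fun i => j.testBit i && decide (j ^^^ 2 ^ i < 2 ^ numbers.length))
        = (List.range N.toNat).filter (fun i => j.testBit i) := by
      apply List.filter_congr
      intro x _
      by_cases hb : j.testBit x
      · have : j ^^^ 2 ^ x < j := pv_xor_lt j x hb
        simp [hb, show j ^^^ 2 ^ x < 2 ^ numbers.length by omega]
      · simp [hb]
    rw [hfil, ← pvG_eq]
  -- B's transition tables and initial memo
  have hGood0 : pvGood K
      mB sB N.toNat
      ((PySem.Dict.empty : PySem.Dict Nat (List Int)).insert 0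
        ((1 : Int) :: List.replicate (K - 1).toNat (0 : Int))) := by
    constructor
    · exact ⟨_, PySem.Dict.get?_insert_self _ _ _⟩
    · intro m v hv
      rw [PySem.Dict.get?_insert] at hv
      by_cases hm : m = 0
      · rw [if_pos hm] at hv
        cases hv
        constructor
        · simp
          omega
        · intro r
          subst hm
          rw [pvH_eq]
          have hfil : (List.range N.toNat).filter (fun i => Nat.testBit 0 i) = [] := by
            simp [Nat.zero_testBit]
          rw [hfil]
          simp only [List.map_nil, List.sum_nil, add_zero]
          cases r with
          | zero => simp
          | succ r' =>
            rw [if_neg (by omega)]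
            simp
      · rw [if_neg hm, PySem.Dict.get?_empty] at hv
        simp at hv
  obtain ⟨-, hLB, hVB⟩ := pv_solve_correct K hK
    mB sB N
    ((1 <<< numbers.length) - 1)
    ((PySem.Dict.empty : PySem.Dict Nat (List Int)).insert 0
      ((1 : Int) :: List.replicate (K - 1).toNat (0 : Int))) hGood0
  -- reading B's tables at i < N
  have hgetB : ∀ (f : Int → Int) (i : Nat), i < N.toNat →
      ((PySem.List.pyRange 0 N 1).map f).getD i 0 = f (i : Int) := by
    intro f i hi
    rw [PySem.List.pyRange_one]
    simp only [Int.sub_zero, List.map_map]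
    rw [List.getD_eq_getElem _ _ (by simpa using hi), List.getElem_map, List.getElem_range]
    norm_num
  have hmods : ∀ i, i < N.toNat →
      mB.getD i 0 = (pvMods numbers K).getD i 0 := by
    intro i hi
    rw [hmB, hgetB _ i hi]
    have hilen : i < numbers.length := by omega
    simp only [Int.toNat_natCast]
    rw [List.getD_eq_getElem (pvMods numbers K) _ (by simp [pvMods, hilen]),
      List.getD_eq_getElem numbers _ (by simpa using hilen)]
    simp [pvMods]
  have hsh : ∀ i, i < N.toNat →
      sB.getD i 0 = PySem.Int.mod ((10 : Int) ^ (pvDeg numbers).getD i 0) K := by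
    intro i hi
    rw [hsB, hgetB _ i hi]
    have hilen : i < numbers.length := by omega
    simp only [Int.toNat_natCast]
    have h1 : numbers.getD i 0 = numbers[i] := List.getD_eq_getElem numbers _ (by simpa using hilen)
    have h2 : (pvDeg numbers).getD i 0 = (PySem.Int.toStr numbers[i]).length := by
      rw [List.getD_eq_getElem (pvDeg numbers) _ (by simp [pvDeg, hilen])]
      simp [pvDeg]
    rw [h1, h2]
    exact PySem.Int.powMod_eq 10 _ K
  have hGH := pv_GH K hK (pvMods numbers K) (pvDeg numbers) mB sB N.toNat hmods hsh
  -- the two final rows agree as lists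
  have hone : (1 <<< numbers.length) - 1 = 2 ^ numbers.length - 1 := by
    rw [Nat.one_shiftLeft]
  have hlenA : (((List.range (2 ^ numbers.length)).foldl
      (pvAStep K (pvMods numbers K) (pvDeg numbers) N.toNat K.toNat)
      (pvSet2 (List.replicate (2 ^ numbers.length) (List.replicate K.toNat (0 : Int))) 0 0 1)).getD
      (2 ^ numbers.length - 1) []).length = K.toNat := hSA.2 _ (by omega)
  have hlast : ((List.range (2 ^ numbers.length)).foldl
      (pvAStep K (pvMods numbers K) (pvDeg numbers) N.toNat K.toNat)
      (pvSet2 (List.replicate (2 ^ numbers.length) (List.replicate K.toNat (0 : Int))) 0 0 1)).getD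
      (2 ^ numbers.length - 1) []
      = (pvSolve K mB sB N
          ((PySem.Dict.empty : PySem.Dict Nat (List Int)).insert 0
            ((1 : Int) :: List.replicate (K - 1).toNat (0 : Int)))
          ((1 <<< numbers.length) - 1)).2 := by
    apply List.ext_getElem (by rw [hlenA, hLB])
    intro i h1 h2
    rw [← List.getD_eq_getElem _ (0 : Int) h1, ← List.getD_eq_getElem _ (0 : Int) h2]
    have hir : i < K.toNat := by rw [hlenA] at h1; exact h1
    rw [hVB i, hone]
    have := hA (2 ^ numbers.length - 1) (by omega) i hir
    rw [show pvGet2 ((List.range (2 ^ numbers.length)).foldl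
        (pvAStep K (pvMods numbers K) (pvDeg numbers) N.toNat K.toNat)
        (pvSet2 (List.replicate (2 ^ numbers.length) (List.replicate K.toNat (0 : Int))) 0 0 1))
        (2 ^ numbers.length - 1) i
        = (((List.range (2 ^ numbers.length)).foldl
        (pvAStep K (pvMods numbers K) (pvDeg numbers) N.toNat K.toNat)
        (pvSet2 (List.replicate (2 ^ numbers.length) (List.replicate K.toNat (0 : Int))) 0 0 1)).getD
        (2 ^ numbers.length - 1) []).getD i 0 from rfl] at this
    rw [this, hGH]
  simp only [get_K_divided_up, get_K_divided_up_alt]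
  rw [hlast]

-- ===== VERDICT (by name: the statement is the Claim_ definition above) =====
theorem get_K_divided_up_spec : Claim_equal_get_K_divided_up := by
  intro N numbers K _ hPre
  unfold Spec_get_K_divided_up
  exact pv_main N numbers K hPre.1 hPre.2
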